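-- pv_equiv track=rewrite | github.com/epoyraz/leetcode | solutions/1632.py | numSplits
-- ===== SOURCE A (Python) =====
-- def numSplits(s):
--     """
--     :type s: str
--     :rtype: int
--     """
--     n = len(s)
--     left_count = [0] * n
--     right_count = [0] * n
--
--     seen_left = set()
--     for i in range(n):
--         seen_left.add(s[i])
--         left_count[i] = len(seen_left)
--
--     seen_right = set()
--     for i in range(n - 1, -1, -1):
--         seen_right.add(s[i])
--         right_count[i] = len(seen_right)
--
--     res = 0
--     for i in range(n - 1):
--         if left_count[i] == right_count[i + 1]:
--             res += 1
--
--     return res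
-- ===== SOURCE B (Python) =====
-- def numSplits(s):
--     counter = {}
--     for c in s:
--         counter[c] = counter.get(c, 0) + 1
--     distinct_right = len(counter)
--     left = set()
--     res = 0
--     for i in range(len(s) - 1):
--         c = s[i]
--         left.add(c)
--         counter[c] -= 1
--         if counter[c] == 0:
--             distinct_right -= 1
--         if len(left) == distinct_right:
--             res += 1
--     return res
-- ===== Notes on version B (the rewrite author's own statement) =====
-- stated objective: alternative
-- what changed: Replaces A's three loops and two precomputed prefix/suffix distinct-count arrays by a single pass that maintains a growing left set and a character counter decremented in place, tracking the right side's distinct count incrementally.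
import Mathlib
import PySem

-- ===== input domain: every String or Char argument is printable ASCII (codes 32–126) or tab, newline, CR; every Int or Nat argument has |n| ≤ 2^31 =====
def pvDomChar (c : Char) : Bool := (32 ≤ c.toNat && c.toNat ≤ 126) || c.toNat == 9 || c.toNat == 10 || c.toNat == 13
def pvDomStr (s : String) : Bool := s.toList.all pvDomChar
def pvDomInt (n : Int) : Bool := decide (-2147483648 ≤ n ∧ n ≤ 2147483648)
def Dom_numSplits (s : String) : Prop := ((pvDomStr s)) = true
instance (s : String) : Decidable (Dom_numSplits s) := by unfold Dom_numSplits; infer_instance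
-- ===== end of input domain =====

-- B replaces A's three loops and two precomputed distinct-count arrays by a single pass that
-- maintains a growing left set and a decremented character counter (an alternative one-pass algorithm).

-- ===== PORT A =====
def numSplits (s : String) : Int :=
  let cs := s.toList
  let n := cs.length
  let leftCount0 : List Int := List.replicate n 0
  let rightCount0 : List Int := List.replicate n 0
  let stL := (PySem.List.pyRange 0 (n : Int) 1).foldl
    (fun (st : PySem.Set Char × List Int) i =>
      let seen := PySem.Set.add st.1 (PySem.List.pyGetD cs i ' ')
      (seen, PySem.List.pySetD st.2 i (seen.length : Int)))
    (PySem.Set.empty, leftCount0)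
  let leftCount := stL.2
  let stR := (PySem.List.pyRange ((n : Int) - 1) (-1) (-1)).foldl
    (fun (st : PySem.Set Char × List Int) i =>
      let seen := PySem.Set.add st.1 (PySem.List.pyGetD cs i ' ')
      (seen, PySem.List.pySetD st.2 i (seen.length : Int)))
    (PySem.Set.empty, rightCount0)
  let rightCount := stR.2
  (PySem.List.pyRange 0 ((n : Int) - 1) 1).foldl
    (fun res i =>
      if PySem.List.pyGetD leftCount i 0 = PySem.List.pyGetD rightCount (i + 1) 0
      then res + 1 else res) 0

-- ===== PORT B =====
def numSplits_alt (s : String) : Int :=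
  let cs := s.toList
  let counter := cs.foldl
    (fun (d : PySem.Dict Char Int) c => d.insert c (d.getD c 0 + 1)) PySem.Dict.empty
  let st := (PySem.List.pyRange 0 ((cs.length : Int) - 1) 1).foldl
    (fun (st : PySem.Dict Char Int × Int × PySem.Set Char × Int) i =>
      let c := PySem.List.pyGetD cs i ' '
      let left := PySem.Set.add st.2.2.1 c
      let counter := st.1.insert c (st.1.getD c 0 - 1)
      let dr := if counter.getD c 0 = 0 then st.2.1 - 1 else st.2.1
      let res := if (left.length : Int) = dr then st.2.2.2 + 1 else st.2.2.2
      (counter, dr, left, res))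
    (counter, (counter.size : Int), PySem.Set.empty, 0)
  st.2.2.2

-- ===== PRECONDITION & SPEC =====
def Spec_numSplits (s : String) (out : Int) : Prop := out = numSplits_alt s
instance (s : String) (out : Int) : Decidable (Spec_numSplits s out) := by unfold Spec_numSplits; infer_instance

-- ===== CLAIM (what is proved, stated in full; the proofs are below) =====
def Claim_equal_numSplits : Prop := ∀ (s : String), Dom_numSplits s → Spec_numSplits s (numSplits s)

-- ===== LEMMAS AND PROOFS =====

def dct (l : List Char) : Nat := (PySem.Set.ofList l).length

lemma dct_rev (l : List Char) : dct l.reverse = dct l := by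
  unfold dct
  apply List.Perm.length_eq
  rw [List.perm_ext_iff_of_nodup (PySem.Set.nodup_ofList _) (PySem.Set.nodup_ofList _)]
  intro x
  simp [PySem.Set.mem_ofList]

lemma leftFold (cs : List Char) (m : Nat) (hm : m ≤ cs.length) :
    (List.range m).foldl
      (fun (st : PySem.Set Char × List Int) k =>
        (PySem.Set.add st.1 (cs.getD k ' '),
         st.2.set k ((PySem.Set.add st.1 (cs.getD k ' ')).length : Int)))
      (PySem.Set.empty, List.replicate cs.length 0)
    = (PySem.Set.ofList (cs.take m),
       (List.range m).map (fun i => (dct (cs.take (i+1)) : Int))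
         ++ List.replicate (cs.length - m) 0) := by
  induction m with
  | zero => simp [PySem.Set.empty, PySem.Set.ofList]
  | succ m ih =>
    have hlt : m < cs.length := by omega
    conv_lhs => rw [List.range_succ]
    rw [List.foldl_append, ih (by omega)]
    simp only [List.foldl_cons, List.foldl_nil]
    have hget : cs.getD m ' ' = cs[m] := List.getD_eq_getElem cs ' ' hlt
    have htake : cs.take (m+1) = cs.take m ++ [cs[m]] := by
      rw [List.take_add_one]; simp [List.getElem?_eq_getElem hlt]
    have hseen : PySem.Set.add (PySem.Set.ofList (cs.take m)) (cs.getD m ' ')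
        = PySem.Set.ofList (cs.take (m+1)) := by
      rw [hget, htake, PySem.Set.ofList_append_singleton]
    rw [hseen]
    congr 1
    have hlen : ((List.range m).map (fun i => (dct (cs.take (i+1)) : Int))).length = m := by simp
    rw [List.set_append, hlen, if_neg (by omega)]
    have hrep : List.replicate (cs.length - m) (0:Int)
        = 0 :: List.replicate (cs.length - (m+1)) 0 := by
      rw [← List.replicate_succ]; congr 1; omega
    rw [List.range_succ, List.map_append, Nat.sub_self, hrep, List.set_cons_zero,
      List.append_assoc]
    simp [dct]

lemma rightFold (cs : List Char) (m : Nat) (hm : m ≤ cs.length) :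
    (List.range m).foldl
      (fun (st : PySem.Set Char × List Int) k =>
        (PySem.Set.add st.1 (cs.getD (cs.length - 1 - k) ' '),
         st.2.set (cs.length - 1 - k)
           ((PySem.Set.add st.1 (cs.getD (cs.length - 1 - k) ' ')).length : Int)))
      (PySem.Set.empty, List.replicate cs.length 0)
    = (PySem.Set.ofList ((cs.drop (cs.length - m)).reverse),
       List.replicate (cs.length - m) 0
         ++ (List.range m).map (fun j => (dct (cs.drop (cs.length - m + j)) : Int))) := by
  induction m with
  | zero => simp [PySem.Set.empty, PySem.Set.ofList]
  | succ m ih =>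
    have hlt : cs.length - 1 - m < cs.length := by omega
    conv_lhs => rw [List.range_succ]
    rw [List.foldl_append, ih (by omega)]
    simp only [List.foldl_cons, List.foldl_nil]
    have hidx : cs.length - 1 - m = cs.length - (m+1) := by omega
    have e1 : cs.length - 1 - m + 1 = cs.length - m := by omega
    have hget : cs.getD (cs.length - 1 - m) ' ' = cs[cs.length - 1 - m] :=
      List.getD_eq_getElem cs ' ' hlt
    have hdrop : cs.drop (cs.length - (m+1)) = cs[cs.length - 1 - m] :: cs.drop (cs.length - m) := by
      rw [← hidx, List.drop_eq_getElem_cons hlt, e1]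
    have hseen : PySem.Set.add (PySem.Set.ofList ((cs.drop (cs.length - m)).reverse))
          (cs.getD (cs.length - 1 - m) ' ')
        = PySem.Set.ofList ((cs.drop (cs.length - (m+1))).reverse) := by
      rw [hget, hdrop, List.reverse_cons, PySem.Set.ofList_append_singleton]
    rw [hseen]
    have hlen2 : (PySem.Set.ofList ((cs.drop (cs.length - (m+1))).reverse)).length
        = dct (cs.drop (cs.length - (m+1))) := dct_rev _
    congr 1
    rw [List.set_append, List.length_replicate, if_pos (by omega)]
    have hrep : List.replicate (cs.length - m) (0:Int)
        = List.replicate (cs.length - (m+1)) 0 ++ [0] := by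
      rw [← List.replicate_succ']; congr 1; omega
    rw [hrep, List.set_append, List.length_replicate, if_neg (by omega), hidx, Nat.sub_self,
      List.set_cons_zero, hlen2]
    rw [List.range_succ_eq_map, List.map_cons, List.map_map, List.append_assoc]
    congr 1
    rw [List.singleton_append]
    refine List.cons_eq_cons.mpr ⟨by simp, ?_⟩
    apply List.map_congr_left
    intro j hj
    simp only [Function.comp]
    have hj' := List.mem_range.mp hj
    have e2 : cs.length - m + j = cs.length - (m + 1) + (j + 1) := by omega
    rw [e2]


lemma numSplits_eq (s : String) :
    numSplits s = (List.range (s.toList.length - 1)).foldl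
      (fun res k => if dct (s.toList.take (k+1)) = dct (s.toList.drop (k+1)) then res + 1 else res)
      (0 : Int) := by
  unfold numSplits
  simp only [PySem.List.pyRange_one, PySem.List.pyRange_neg_one]
  have hn0 : ((s.toList.length : Int) - 0).toNat = s.toList.length := by omega
  have hn1 : ((s.toList.length : Int) - 1 - -1).toNat = s.toList.length := by omega
  have hn2 : ((s.toList.length : Int) - 1 - 0).toNat = s.toList.length - 1 := by omega
  rw [hn0, hn1, hn2]
  rw [List.foldl_map, List.foldl_map, List.foldl_map]
  rw [PySem.List.foldl_congr_mem (List.range s.toList.length) _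
        (fun (st : PySem.Set Char × List Int) k =>
          (PySem.Set.add st.1 (s.toList.getD k ' '),
           st.2.set k ((PySem.Set.add st.1 (s.toList.getD k ' ')).length : Int)))
        (PySem.Set.empty, List.replicate s.toList.length 0)
        (by intro acc k hk; simp)]
  rw [PySem.List.foldl_congr_mem (List.range s.toList.length)
        (fun (st : PySem.Set Char × List Int) k =>
          (PySem.Set.add st.1 (PySem.List.pyGetD s.toList ((s.toList.length : Int) - 1 - (k : Int)) ' '),
           PySem.List.pySetD st.2 ((s.toList.length : Int) - 1 - (k : Int))
             ((PySem.Set.add st.1 (PySem.List.pyGetD s.toList ((s.toList.length : Int) - 1 - (k : Int)) ' ')).length : Int)))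
        (fun (st : PySem.Set Char × List Int) k =>
          (PySem.Set.add st.1 (s.toList.getD (s.toList.length - 1 - k) ' '),
           st.2.set (s.toList.length - 1 - k)
             ((PySem.Set.add st.1 (s.toList.getD (s.toList.length - 1 - k) ' ')).length : Int)))
        (PySem.Set.empty, List.replicate s.toList.length 0)
        (by intro acc k hk
            have hk' : k < s.toList.length := List.mem_range.mp hk
            have e : (s.toList.length : Int) - 1 - (k : Int) = ((s.toList.length - 1 - k : Nat) : Int) := by
              omega
            simp only [e, PySem.List.pyGetD_natCast, PySem.List.pySetD_natCast])]
  rw [leftFold s.toList s.toList.length le_rfl, rightFold s.toList s.toList.length le_rfl]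
  simp only [Nat.sub_self, List.replicate_zero, List.append_nil, List.nil_append,
    Nat.zero_add]
  apply PySem.List.foldl_congr_mem
  intro acc k hk
  have hkn : k + 1 < s.toList.length := by
    have := List.mem_range.mp hk; omega
  have hk1 : k < s.toList.length := by omega
  have e0 : (0:Int) + (k:Int) = ((k:Nat):Int) := by omega
  have e1 : (k:Int) + 1 = ((k+1:Nat):Int) := by push_cast; ring
  rw [e0, e1, PySem.List.pyGetD_natCast, PySem.List.pyGetD_natCast,
      PySem.List.getD_map_range _ _ _ _ hk1, PySem.List.getD_map_range _ _ _ _ hkn]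
  simp [Nat.cast_inj]


lemma dct_eq_card (l : List Char) : dct l = l.toFinset.card := by
  unfold dct
  rw [← List.toFinset_card_of_nodup (PySem.Set.nodup_ofList l)]
  congr 1
  ext x
  simp [PySem.Set.mem_ofList]

lemma dct_cons (c : Char) (l : List Char) :
    dct (c :: l) = if c ∈ l then dct l else dct l + 1 := by
  simp only [dct_eq_card, List.toFinset_cons]
  split_ifs with h
  · rw [Finset.insert_eq_self.mpr (by simp [h])]
  · rw [Finset.card_insert_of_notMem (by simp [h])]

lemma getD_foldl_insert_sub_one (l : List Char) (d : PySem.Dict Char Int) (v : Char) :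
    (l.foldl (fun d x => d.insert x (d.getD x 0 - 1)) d).getD v 0
      = d.getD v 0 - l.count v := by
  induction l generalizing d with
  | nil => simp
  | cons x xs ih =>
      rw [List.foldl_cons, ih, PySem.Dict.getD_insert]
      by_cases h : v = x
      · subst h
        rw [List.count_cons_self, if_pos rfl]
        push_cast; ring
      · rw [List.count_cons_of_ne (fun hh => h hh.symm), if_neg h]

lemma altFold (cs : List Char) (m : Nat) (hm : m ≤ cs.length) :
    (List.range m).foldl
      (fun (st : PySem.Dict Char Int × Int × PySem.Set Char × Int) k =>
        let c := cs.getD k ' '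
        let left := PySem.Set.add st.2.2.1 c
        let counter := st.1.insert c (st.1.getD c 0 - 1)
        let dr := if counter.getD c 0 = 0 then st.2.1 - 1 else st.2.1
        let res := if (left.length : Int) = dr then st.2.2.2 + 1 else st.2.2.2
        (counter, dr, left, res))
      (PySem.Dict.counter cs, (dct cs : Int), PySem.Set.empty, 0)
    = ((cs.take m).foldl (fun d x => d.insert x (d.getD x 0 - 1)) (PySem.Dict.counter cs),
       (dct (cs.drop m) : Int),
       PySem.Set.ofList (cs.take m),
       (List.range m).foldl
         (fun r k => if dct (cs.take (k+1)) = dct (cs.drop (k+1)) then r + 1 else r) (0:Int)) := by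
  induction m with
  | zero => simp [PySem.Set.empty, PySem.Set.ofList]
  | succ m ih =>
    have hlt : m < cs.length := by omega
    conv_lhs => rw [List.range_succ]
    rw [List.foldl_append, ih (by omega)]
    simp only [List.foldl_cons, List.foldl_nil]
    have hget : cs.getD m ' ' = cs[m] := List.getD_eq_getElem cs ' ' hlt
    have htake : cs.take (m+1) = cs.take m ++ [cs[m]] := by
      rw [List.take_add_one]; simp [List.getElem?_eq_getElem hlt]
    have hdrop : cs.drop m = cs[m] :: cs.drop (m+1) := List.drop_eq_getElem_cons hlt
    rw [hget]
    have hc1 : ((cs.take m).foldl (fun d x => d.insert x (d.getD x 0 - 1))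
          (PySem.Dict.counter cs)).insert cs[m]
          (((cs.take m).foldl (fun d x => d.insert x (d.getD x 0 - 1))
              (PySem.Dict.counter cs)).getD cs[m] 0 - 1)
        = (cs.take (m+1)).foldl (fun d x => d.insert x (d.getD x 0 - 1))
            (PySem.Dict.counter cs) := by
      rw [htake, List.foldl_append, List.foldl_cons, List.foldl_nil]
    have hseen : PySem.Set.add (PySem.Set.ofList (cs.take m)) cs[m]
        = PySem.Set.ofList (cs.take (m+1)) := by
      rw [htake, PySem.Set.ofList_append_singleton]
    rw [hc1, hseen]
    have hcnt : ((cs.take (m+1)).foldl (fun d x => d.insert x (d.getD x 0 - 1))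
          (PySem.Dict.counter cs)).getD cs[m] 0
        = (List.count cs[m] (cs.drop (m+1)) : Int) := by
      rw [getD_foldl_insert_sub_one, PySem.Dict.getD_counter]
      have hsplit : List.count cs[m] (cs.take (m+1) ++ cs.drop (m+1))
          = List.count cs[m] (cs.take (m+1)) + List.count cs[m] (cs.drop (m+1)) :=
        List.count_append
      rw [List.take_append_drop] at hsplit
      rw [hsplit]; push_cast; ring
    have hdr : (if ((cs.take (m+1)).foldl (fun d x => d.insert x (d.getD x 0 - 1))
            (PySem.Dict.counter cs)).getD cs[m] 0 = 0
          then (dct (cs.drop m) : Int) - 1 else (dct (cs.drop m) : Int))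
        = (dct (cs.drop (m+1)) : Int) := by
      rw [hcnt]
      by_cases hmem : cs[m] ∈ cs.drop (m+1)
      · rw [if_neg (by simp [List.count_eq_zero]; exact hmem), hdrop, dct_cons, if_pos hmem]
      · rw [if_pos (by simp [List.count_eq_zero, hmem]), hdrop, dct_cons, if_neg hmem]
        push_cast; ring
    rw [hdr]
    have hres : ((PySem.Set.ofList (cs.take (m+1))).length : Int)
          = (dct (cs.take (m+1)) : Int) ↔ True := by simp [dct]
    conv_rhs => rw [List.range_succ]
    rw [List.foldl_append, List.foldl_cons, List.foldl_nil]
    congr 1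
    congr 1
    simp [dct, Nat.cast_inj]

lemma numSplits_alt_eq (s : String) :
    numSplits_alt s = (List.range (s.toList.length - 1)).foldl
      (fun res k => if dct (s.toList.take (k+1)) = dct (s.toList.drop (k+1)) then res + 1 else res)
      (0 : Int) := by
  simp only [numSplits_alt, PySem.List.pyRange_one,
    PySem.Dict.foldl_insert_getD_add_one_eq_counter]
  have hn : ((s.toList.length : Int) - 1 - 0).toNat = s.toList.length - 1 := by omega
  rw [hn, List.foldl_map]
  have hsize : (PySem.Dict.counter s.toList).size = dct s.toList := by
    have h1 := congrArg List.length (PySem.Dict.keys_counter s.toList)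
    simpa [PySem.Dict.keys, PySem.Dict.size, dct] using h1
  rw [hsize]
  rw [PySem.List.foldl_congr_mem (List.range (s.toList.length - 1)) _
        (fun (st : PySem.Dict Char Int × Int × PySem.Set Char × Int) k =>
          let c := s.toList.getD k ' '
          let left := PySem.Set.add st.2.2.1 c
          let counter := st.1.insert c (st.1.getD c 0 - 1)
          let dr := if counter.getD c 0 = 0 then st.2.1 - 1 else st.2.1
          let res := if (left.length : Int) = dr then st.2.2.2 + 1 else st.2.2.2
          (counter, dr, left, res))
        (PySem.Dict.counter s.toList, (dct s.toList : Int), PySem.Set.empty, 0)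
        (by intro acc k hk; simp [PySem.List.pyGetD_natCast])]
  rw [altFold s.toList (s.toList.length - 1) (by omega)]

-- ===== VERDICT (by name: the statement is the Claim_ definition above) =====
theorem numSplits_spec : Claim_equal_numSplits := by
  intro s _
  unfold Spec_numSplits
  rw [numSplits_eq, numSplits_alt_eq]
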